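-- pv_equiv track=rewrite | github.com/ivanopaulon/EventForge | phase3b_mudtext.py | extract_attr_value
-- ===== SOURCE A (Python) =====
-- def extract_attr_value(tag_text, start_pos):
--     """
--     Given tag_text and the position just after the opening quote of an attribute value,
--     extract the full value content, handling @() Razor expressions.
--     Returns (value_content, end_pos_after_closing_quote).
--     """
--     # Determine quote char
--     quote_char = tag_text[start_pos - 1]
--     i = start_pos
--     depth = 0  # depth for @() nesting
--     result = []
--     while i < len(tag_text):
--         ch = tag_text[i]
--         if depth == 0 and ch == quote_char:
--             # End of attribute value
--             return ''.join(result), i + 1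
--         elif ch == '@' and i + 1 < len(tag_text) and tag_text[i + 1] == '(':
--             # Razor expression @(...)
--             result.append(ch)
--             i += 1
--             result.append(tag_text[i])
--             i += 1
--             depth = 1
--             while i < len(tag_text) and depth > 0:
--                 c = tag_text[i]
--                 if c == '(':
--                     depth += 1
--                 elif c == ')':
--                     depth -= 1
--                 result.append(c)
--                 i += 1
--         else:
--             result.append(ch)
--             i += 1
--     return ''.join(result), i
-- ===== SOURCE B (Python) =====
-- def extract_attr_value(tag_text, start_pos):
--     """
--     Flat single-loop scan: find the boundary index first (tracking @() paren
--     depth with an index and a depth counter only), then slice once.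
--     Returns (value_content, end_pos_after_closing_quote).
--     """
--     quote_char = tag_text[start_pos - 1]
--     n = len(tag_text)
--     i = start_pos
--     depth = 0
--     found = False
--     while i < n:
--         ch = tag_text[i]
--         if depth == 0:
--             if ch == quote_char:
--                 found = True
--                 break
--             if ch == '@' and i + 1 < n and tag_text[i + 1] == '(':
--                 i += 2
--                 depth = 1
--                 continue
--         elif ch == '(':
--             depth += 1
--         elif ch == ')':
--             depth -= 1
--         i += 1
--     return tag_text[start_pos:i], i + 1 if found else i
-- ===== Notes on version B (the rewrite author's own statement) =====
-- stated objective: simpler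
-- what changed: B replaces A's nested loops and character-by-character result-list accumulation with one flat state-machine loop that only advances an index and a paren depth, then takes a single slice tag_text[start_pos:i] at the end.
-- outside the precondition, e.g. on extract_attr_value('ab', -1): A returns ('b', 1), B returns ('', 1)
import Mathlib
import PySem

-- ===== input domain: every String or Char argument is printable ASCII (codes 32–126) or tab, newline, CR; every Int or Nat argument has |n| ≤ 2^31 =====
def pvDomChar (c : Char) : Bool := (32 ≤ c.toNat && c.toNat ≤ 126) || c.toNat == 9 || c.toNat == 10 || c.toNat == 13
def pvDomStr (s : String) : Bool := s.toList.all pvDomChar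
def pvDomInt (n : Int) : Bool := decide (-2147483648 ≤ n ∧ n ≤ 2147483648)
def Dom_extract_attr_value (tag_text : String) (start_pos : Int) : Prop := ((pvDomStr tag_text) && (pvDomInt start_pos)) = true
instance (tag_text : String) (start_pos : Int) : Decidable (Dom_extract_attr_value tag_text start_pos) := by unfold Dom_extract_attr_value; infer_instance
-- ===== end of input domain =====

-- B replaces A's nested loops + char-by-char result accumulation with one flat
-- index/depth state machine followed by a single slice (objective: simpler).

-- ===== PORT A =====
-- A's inner 'while i < len(tag_text) and depth > 0' loop; returns (result, i, depth)
def pvAInner (s : List Char) (i depth : Nat) (result : List Char) : List Char × Nat × Nat :=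
  if h : i < s.length ∧ 0 < depth then
    let c := s[i]'h.1
    let depth' := if c = '(' then depth + 1 else if c = ')' then depth - 1 else depth
    pvAInner s (i + 1) depth' (result ++ [c])
  else
    (result, i, depth)
termination_by s.length - i
decreasing_by exact Nat.sub_succ_lt_self _ _ h.1

-- i never decreases across the inner loop (cited by pvAOuter's decreasing_by)
theorem pvAInner_le (s : List Char) (i depth : Nat) (result : List Char) :
    i ≤ (pvAInner s i depth result).2.1 := by
  fun_induction pvAInner s i depth result with
  | case1 i depth result h c depth' ih => omega
  | case2 => simp

-- A's outer 'while i < len(tag_text)' loop; returns (result, i)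
def pvAOuter (s : List Char) (q : Char) (i depth : Nat) (result : List Char) : List Char × Nat :=
  if h : i < s.length then
    let ch := s[i]'h
    if depth = 0 ∧ ch = q then
      (result, i + 1)
    else if ch = '@' ∧ s[i+1]? = some '(' then
      let o := pvAInner s (i + 2) 1 (result ++ [ch] ++ [s[i+1]!])
      pvAOuter s q o.2.1 o.2.2 o.1
    else
      pvAOuter s q (i + 1) depth (result ++ [ch])
  else
    (result, i)
termination_by s.length - i
decreasing_by
  · exact Nat.sub_lt_sub_left h (Nat.lt_of_lt_of_le (Nat.lt_add_of_pos_right (by decide))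
      (pvAInner_le s (i + 2) 1 (result ++ [s[i]'h] ++ [s[i+1]!])))
  · exact Nat.sub_succ_lt_self _ _ h

def extract_attr_value (tag_text : String) (start_pos : Int) : String × Int :=
  let s := tag_text.toList
  -- quote_char = tag_text[start_pos - 1]; an invalid index raises in Python (excluded by Pre_)
  let q := (PySem.List.pyGet? s (start_pos - 1)).getD ' '
  let o := pvAOuter s q start_pos.toNat 0 []
  (String.mk o.1, (o.2 : Int))

-- ===== PORT B =====
-- B's single flat loop: advances only an index and a paren depth; returns (stop index, found-closing-quote)
def pvBScan (s : List Char) (q : Char) (i depth : Nat) : Nat × Bool :=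
  if h : i < s.length then
    let ch := s[i]'h
    if depth = 0 then
      if ch = q then (i, true)
      else if ch = '@' ∧ s[i+1]? = some '(' then pvBScan s q (i + 2) 1
      else pvBScan s q (i + 1) 0
    else
      pvBScan s q (i + 1) (if ch = '(' then depth + 1 else if ch = ')' then depth - 1 else depth)
  else
    (i, false)
termination_by s.length - i
decreasing_by
  · exact Nat.sub_lt_sub_left h (Nat.lt_add_of_pos_right (by decide))
  · exact Nat.sub_succ_lt_self _ _ h
  · exact Nat.sub_succ_lt_self _ _ h

def extract_attr_value_alt (tag_text : String) (start_pos : Int) : String × Int :=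
  let s := tag_text.toList
  let q := (PySem.List.pyGet? s (start_pos - 1)).getD ' '
  let r := pvBScan s q start_pos.toNat 0
  (String.mk (PySem.List.slice s (some start_pos) (some (r.1 : Int))),
   if r.2 then (r.1 : Int) + 1 else (r.1 : Int))

-- ===== PRECONDITION & SPEC =====
-- Pre_ excludes start_pos outside [-len+1, len] (A raises IndexError on tag_text[start_pos - 1])
-- and also negative start_pos, where A returns but its scan runs over Python negative indices and
-- wraps from the end of the string back to the front, an accident of A's indexing that B's
-- slice-based scan does not reproduce (start_pos = 0, where only the quote-char lookup wraps
-- and the two programs agree, stays inside Pre_).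
def Pre_extract_attr_value (tag_text : String) (start_pos : Int) : Prop :=
  0 ≤ start_pos ∧ start_pos ≤ (tag_text.toList.length : Int) ∧ 1 ≤ start_pos + (tag_text.toList.length : Int)
instance (tag_text : String) (start_pos : Int) : Decidable (Pre_extract_attr_value tag_text start_pos) := by unfold Pre_extract_attr_value; infer_instance

def pvWitness_extract_attr_value : String × Int := ("ab@(x)c\"d", 1)

def Spec_extract_attr_value (tag_text : String) (start_pos : Int) (out : String × Int) : Prop := out = extract_attr_value_alt tag_text start_pos
instance (tag_text : String) (start_pos : Int) (out : String × Int) : Decidable (Spec_extract_attr_value tag_text start_pos out) := by unfold Spec_extract_attr_value; infer_instance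

-- ===== CLAIM (what is proved, stated in full; the proofs are below) =====
def Claim_equal_extract_attr_value : Prop := ∀ (tag_text : String) (start_pos : Int), Dom_extract_attr_value tag_text start_pos → Pre_extract_attr_value tag_text start_pos → Spec_extract_attr_value tag_text start_pos (extract_attr_value tag_text start_pos)

-- ===== LEMMAS AND PROOFS =====

def pvSeg (s : List Char) (i j : Nat) : List Char := (s.drop i).take (j - i)
theorem pvSeg_self (s : List Char) (i : Nat) : pvSeg s i i = [] := by simp [pvSeg]
theorem pvSeg_append (s : List Char) {i j k : Nat} (hij : i ≤ j) (hjk : j ≤ k) :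
    pvSeg s i j ++ pvSeg s j k = pvSeg s i k := by
  unfold pvSeg
  have h1 : s.drop j = (s.drop i).drop (j - i) := by rw [List.drop_drop]; congr 1; omega
  rw [h1, ← List.take_add]; congr 1; omega
theorem pvSeg_one (s : List Char) {i : Nat} (h : i < s.length) :
    pvSeg s i (i + 1) = [s[i]] := by
  simp [pvSeg, List.take_one, List.head?_drop, h]

theorem pvBScan_pos (s : List Char) (q : Char) (i depth : Nat) (h : i < s.length) (hd : 0 < depth) :
    pvBScan s q i depth = pvBScan s q (i + 1) (if s[i] = '(' then depth + 1 else if s[i] = ')' then depth - 1 else depth) := by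
  rw [pvBScan]; simp [h, Nat.pos_iff_ne_zero.mp hd]

theorem pvAInner_bridge (s : List Char) (q : Char) (i depth : Nat) (result : List Char) :
    (pvAInner s i depth result).1 = result ++ pvSeg s i (pvAInner s i depth result).2.1 ∧
    i ≤ (pvAInner s i depth result).2.1 ∧
    (0 < (pvAInner s i depth result).2.2 → s.length ≤ (pvAInner s i depth result).2.1) ∧
    pvBScan s q i depth = pvBScan s q (pvAInner s i depth result).2.1 (pvAInner s i depth result).2.2 := by
  fun_induction pvAInner s i depth result with
  | case1 i depth result h c depth' ih =>
    obtain ⟨ih1, ih2, ih3, ih4⟩ := ih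
    set o := pvAInner s (i + 1) depth' (result ++ [c]) with ho
    refine ⟨?_, by omega, ih3, ?_⟩
    · rw [ih1, List.append_assoc]
      congr 1
      rw [show [c] = pvSeg s i (i + 1) from (pvSeg_one s h.1).symm]
      exact pvSeg_append s (by omega) ih2
    · rw [pvBScan_pos s q i depth h.1 h.2]
      exact ih4
  | case2 i depth result h =>
    refine ⟨by simp [pvSeg_self], le_refl _, ?_, rfl⟩
    intro hd
    dsimp only at hd ⊢
    omega

theorem pvBScan_ge (s : List Char) (q : Char) (i depth : Nat) :
    i ≤ (pvBScan s q i depth).1 := by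
  fun_induction pvBScan s q i depth <;> simp_all <;> omega

theorem pvBScan_quote {s : List Char} {q : Char} {i : Nat} (h : i < s.length) (hq : s[i] = q) :
    pvBScan s q i 0 = (i, true) := by
  rw [pvBScan]; simp [h, hq]

theorem pvBScan_at {s : List Char} {q : Char} {i : Nat} (h : i < s.length) (hq : ¬ s[i] = q)
    (hat : s[i] = '@' ∧ s[i+1]? = some '(') :
    pvBScan s q i 0 = pvBScan s q (i + 2) 1 := by
  have hq2 : ¬ ('@' : Char) = q := hat.1 ▸ hq
  rw [pvBScan]; simp [h, hat.1, hat.2, hq2]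

theorem pvBScan_other {s : List Char} {q : Char} {i : Nat} (h : i < s.length) (hq : ¬ s[i] = q)
    (hat : ¬ (s[i] = '@' ∧ s[i+1]? = some '(')) :
    pvBScan s q i 0 = pvBScan s q (i + 1) 0 := by
  rw [pvBScan]; simp [h, hq]; intro h1 h2; exact absurd ⟨h1, h2⟩ hat

theorem pvBScan_end {s : List Char} {q : Char} {i depth : Nat} (h : ¬ i < s.length) :
    pvBScan s q i depth = (i, false) := by
  rw [pvBScan]; simp [h]

theorem pvAOuter_quote {s : List Char} {q : Char} {i : Nat} {result : List Char}
    (h : i < s.length) (hq : s[i] = q) :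
    pvAOuter s q i 0 result = (result, i + 1) := by
  rw [pvAOuter]; simp [h, hq]

theorem pvAOuter_at {s : List Char} {q : Char} {i : Nat} {result : List Char}
    (h : i < s.length) (hq : ¬ s[i] = q) (hat : s[i] = '@' ∧ s[i+1]? = some '(') :
    pvAOuter s q i 0 result =
      pvAOuter s q (pvAInner s (i + 2) 1 (result ++ [s[i]] ++ [s[i+1]!])).2.1
        (pvAInner s (i + 2) 1 (result ++ [s[i]] ++ [s[i+1]!])).2.2
        (pvAInner s (i + 2) 1 (result ++ [s[i]] ++ [s[i+1]!])).1 := by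
  have hq2 : ¬ ('@' : Char) = q := hat.1 ▸ hq
  rw [pvAOuter]; simp [h, hat.1, hat.2, hq2]

theorem pvAOuter_other {s : List Char} {q : Char} {i : Nat} {result : List Char}
    (h : i < s.length) (hq : ¬ s[i] = q) (hat : ¬ (s[i] = '@' ∧ s[i+1]? = some '(')) :
    pvAOuter s q i 0 result = pvAOuter s q (i + 1) 0 (result ++ [s[i]]) := by
  rw [pvAOuter]; simp [h, hq]; intro h1 h2; exact absurd ⟨h1, h2⟩ hat

theorem pvAOuter_end {s : List Char} {q : Char} {i depth : Nat} {result : List Char}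
    (h : ¬ i < s.length) :
    pvAOuter s q i depth result = (result, i) := by
  rw [pvAOuter]; simp [h]

theorem pvSeg_two (s : List Char) {i : Nat} (h : i + 1 < s.length) :
    pvSeg s i (i + 2) = [s[i], s[i+1]] := by
  have h0 : i < s.length := by omega
  rw [show i + 2 = (i + 1) + 1 from rfl,
      ← pvSeg_append s (show i ≤ i + 1 by omega) (show i + 1 ≤ (i + 1) + 1 by omega),
      pvSeg_one s h0, pvSeg_one s h]
  rfl

theorem pvAOuter_bridge (s : List Char) (q : Char) :
    ∀ n i result, s.length - i ≤ n →
    pvAOuter s q i 0 result =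
      (result ++ pvSeg s i (pvBScan s q i 0).1,
       if (pvBScan s q i 0).2 then (pvBScan s q i 0).1 + 1 else (pvBScan s q i 0).1) := by
  intro n
  induction n with
  | zero =>
    intro i result hle
    have hi : ¬ i < s.length := by omega
    rw [pvAOuter_end hi, pvBScan_end hi]
    simp [pvSeg_self]
  | succ n ih =>
    intro i result hle
    by_cases hi : i < s.length
    · by_cases hq : s[i] = q
      · rw [pvAOuter_quote hi hq, pvBScan_quote hi hq]
        simp [pvSeg_self]
      · by_cases hat : s[i] = '@' ∧ s[i+1]? = some '('
        · -- the '@(' branch: A dives into its inner loop, B continues at depth 1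
          obtain ⟨hl1, hv1⟩ := List.getElem?_eq_some_iff.mp hat.2
          have hbang : s[i+1]! = s[i+1] := getElem!_pos s (i+1) hl1
          rw [pvAOuter_at hi hq hat, pvBScan_at hi hq hat]
          obtain ⟨h1, h2, h3, h4⟩ := pvAInner_bridge s q (i + 2) 1 (result ++ [s[i]] ++ [s[i+1]!])
          set o := pvAInner s (i + 2) 1 (result ++ [s[i]] ++ [s[i+1]!]) with ho
          have hres : o.1 = result ++ pvSeg s i o.2.1 := by
            rw [h1, hbang, List.append_assoc, List.append_assoc]
            congr 1
            rw [← List.append_assoc, show [s[i]] ++ [s[i+1]] = pvSeg s i (i + 2) from (pvSeg_two s hl1).symm]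
            exact pvSeg_append s (by omega) h2
          rw [h4]
          by_cases hd : o.2.2 = 0
          · rw [hd]
            rw [ih o.2.1 o.1 (by omega)]
            rw [hres, List.append_assoc, pvSeg_append s (by omega) (pvBScan_ge s q o.2.1 0)]
          · have hlen : s.length ≤ o.2.1 := h3 (by omega)
            have hni : ¬ o.2.1 < s.length := by omega
            rw [pvAOuter_end hni, pvBScan_end hni]
            simp [hres]
        · -- plain character at depth 0
          rw [pvAOuter_other hi hq hat, pvBScan_other hi hq hat]
          rw [ih (i + 1) (result ++ [s[i]]) (by omega)]
          rw [List.append_assoc, show [s[i]] = pvSeg s i (i + 1) from (pvSeg_one s hi).symm,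
              pvSeg_append s (by omega) (pvBScan_ge s q (i + 1) 0)]
    · have h0 : ¬ i < s.length := hi
      rw [pvAOuter_end h0, pvBScan_end h0]
      simp [pvSeg_self]

-- ===== VERDICT (by name: the statement is the Claim_ definition above) =====
theorem extract_attr_value_spec : Claim_equal_extract_attr_value := by
  intro t p _ hpre
  obtain ⟨hp1, hp2, hp3⟩ := hpre
  unfold Spec_extract_attr_value extract_attr_value extract_attr_value_alt
  dsimp only
  set s := t.toList with hs
  set q := (PySem.List.pyGet? s (p - 1)).getD ' ' with hq
  have hcast : ((p.toNat : Nat) : Int) = p := Int.toNat_of_nonneg (by omega)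
  rw [pvAOuter_bridge s q s.length p.toNat [] (by omega)]
  have e1 : PySem.List.slice s (some p) (some ((pvBScan s q p.toNat 0).1 : Int))
      = pvSeg s p.toNat (pvBScan s q p.toNat 0).1 := by
    rw [← hcast, PySem.List.slice_natCast]; rfl
  rw [e1]
  simp only [List.nil_append]
  cases (pvBScan s q p.toNat 0).2 <;> simp
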